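-- pv_equiv track=rewrite | github.com/sam4tech/py-code | lists/dictionary.py | calculate_total_savings
-- ===== SOURCE A (Python) =====
-- def calculate_total_savings(num_weeks):
--     total_savings = 0
--     day_savings = 1  # Initial savings for Monday
--     for week in range(num_weeks):
--         for day in range(7):
--             total_savings += day_savings
--             day_savings += 1
--             if day_savings > 7:
--                 day_savings = 1  # Reset day savings to 1 for Monday
--     return total_savings
-- ===== SOURCE B (Python) =====
-- def calculate_total_savings(num_weeks):
--     # Each week contributes 1+2+...+7 = 28, and the day counter resets weekly.
--     return 28 * max(0, num_weeks)
-- ===== Notes on version B (the rewrite author's own statement) =====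
-- stated objective: faster
-- what changed: Replaced the week/day double loop by the closed form 28*max(0,num_weeks), since each 7-day week sums 1..7 = 28 and the day counter resets every week.
import Mathlib
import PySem

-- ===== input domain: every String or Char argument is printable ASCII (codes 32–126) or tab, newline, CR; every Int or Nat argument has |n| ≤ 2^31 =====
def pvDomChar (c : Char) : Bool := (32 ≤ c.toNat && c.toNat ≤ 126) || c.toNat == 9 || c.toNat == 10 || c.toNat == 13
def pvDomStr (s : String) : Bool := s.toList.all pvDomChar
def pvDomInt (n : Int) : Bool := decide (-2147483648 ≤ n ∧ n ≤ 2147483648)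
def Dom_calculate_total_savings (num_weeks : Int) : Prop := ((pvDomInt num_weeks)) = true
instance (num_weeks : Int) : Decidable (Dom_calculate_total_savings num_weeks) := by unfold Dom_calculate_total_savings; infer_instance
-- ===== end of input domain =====

-- ===== PORT A =====
-- faithful port of A: outer loop over weeks, inner loop over 7 days, state (total, day)
def calculate_total_savings (num_weeks : Int) : Int :=
  let s := (PySem.List.pyRange 0 num_weeks 1).foldl
    (fun (st : Int × Int) _week =>
      (PySem.List.pyRange 0 7 1).foldl
        (fun (p : Int × Int) _day =>
          let total := p.1 + p.2
          let day := p.2 + 1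
          if day > 7 then (total, 1) else (total, day)) st) (0, 1)
  s.1

-- ===== PORT B =====
-- B: closed form, 28 per week
def calculate_total_savings_alt (num_weeks : Int) : Int := 28 * max 0 num_weeks

-- ===== PRECONDITION & SPEC =====
def Spec_calculate_total_savings (num_weeks : Int) (out : Int) : Prop := out = calculate_total_savings_alt num_weeks
instance (num_weeks : Int) (out : Int) : Decidable (Spec_calculate_total_savings num_weeks out) := by unfold Spec_calculate_total_savings; infer_instance

-- ===== CLAIM (what is proved, stated in full; the proofs are below) =====
def Claim_equal_calculate_total_savings : Prop := ∀ (num_weeks : Int), Dom_calculate_total_savings num_weeks → Spec_calculate_total_savings num_weeks (calculate_total_savings num_weeks)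

-- ===== LEMMAS AND PROOFS =====

-- ===== VERDICT (by name: the statement is the Claim_ definition above) =====
-- one week from state (t, 1) adds 28 and returns the day counter to 1
lemma pv_week (t : Int) :
    (PySem.List.pyRange 0 7 1).foldl
      (fun (p : Int × Int) _day =>
        let total := p.1 + p.2
        let day := p.2 + 1
        if day > 7 then (total, 1) else (total, day)) (t, 1) = (t + 28, 1) := by
  simp [PySem.List.pyRange, List.range_succ]
  omega

lemma pv_weeks (l : List Int) (t : Int) :
    l.foldl
      (fun (st : Int × Int) _week =>
        (PySem.List.pyRange 0 7 1).foldl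
          (fun (p : Int × Int) _day =>
            let total := p.1 + p.2
            let day := p.2 + 1
            if day > 7 then (total, 1) else (total, day)) st) (t, 1)
      = (t + 28 * l.length, 1) := by
  induction l generalizing t with
  | nil => simp
  | cons a tl ih =>
      simp only [List.foldl_cons, pv_week, ih]
      rw [Prod.mk.injEq]
      refine ⟨?_, rfl⟩
      push_cast [List.length_cons]
      ring

theorem calculate_total_savings_spec : Claim_equal_calculate_total_savings := by
  intro n _
  unfold Spec_calculate_total_savings calculate_total_savings calculate_total_savings_alt
  rw [pv_weeks]
  simp only [PySem.List.length_pyRange_one, Int.sub_zero, Int.zero_add]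
  omega
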